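-- pv_equiv track=rewrite | github.com/vadam99/Licenta | main.py | verifica_zone
-- ===== SOURCE A (Python) =====
-- def verifica_zone(board):
--     for i in range(3):      # Prima linie din zona i
--         for j in range(3):  # Prima coloana din zona j
--             d = dict()
--             for ii in range(3):
--                 for jj in range(3):
--                     lin = ii + i * 3
--                     col = jj + j * 3
--                     nr = board[lin][col]
--                     if nr != 0 and nr in d.keys():
--                         return False
--                     d[nr] = nr
--     return True
-- ===== SOURCE B (Python) =====
-- def verifica_zone(board):
--     def go(k, seen):
--         if k == 81:
--             return True
--         z, c = divmod(k, 9)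
--         v = board[(z // 3) * 3 + c // 3][(z % 3) * 3 + c % 3]
--         if v != 0 and v in seen:
--             return False
--         return go(k + 1, set() if c == 8 else seen | {v})
--     return go(0, set())
-- ===== Notes on version B (the rewrite author's own statement) =====
-- stated objective: alternative
-- what changed: Replaces the four nested range(3) loops with an incremental per-zone dict by a single flat recursion over the cell index 0..80 that decodes zone and cell by divmod and keeps a set of the zone's values, reset at each zone boundary.
import Mathlib
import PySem

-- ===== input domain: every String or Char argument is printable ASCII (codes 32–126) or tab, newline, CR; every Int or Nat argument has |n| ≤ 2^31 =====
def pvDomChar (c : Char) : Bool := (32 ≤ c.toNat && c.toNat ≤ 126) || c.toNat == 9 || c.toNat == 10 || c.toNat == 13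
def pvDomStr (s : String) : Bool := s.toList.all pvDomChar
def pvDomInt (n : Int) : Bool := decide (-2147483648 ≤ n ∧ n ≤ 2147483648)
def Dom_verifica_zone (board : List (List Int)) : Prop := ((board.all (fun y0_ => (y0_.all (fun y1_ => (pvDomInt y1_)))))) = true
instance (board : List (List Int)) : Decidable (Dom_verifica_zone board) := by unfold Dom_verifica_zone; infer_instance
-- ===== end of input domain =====

-- B replaces A's four nested loops with an incremental per-zone dict by a single flat
-- recursion over the cell index 0..80 that decodes (zone, cell) by divmod and keeps a set
-- that is reset at each zone boundary; same scan order and early exit (objective: alternative).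

-- shared by both ports: board[lin][col]; the defaults are never used on inputs satisfying Pre_verifica_zone
def pvGet (board : List (List Int)) (lin col : Int) : Int :=
  PySem.List.pyGetD (PySem.List.pyGetD board lin []) col 0

-- ===== PORT A =====
-- for ii in range(3): for jj in range(3): … with the early 'return False'
def vzInner (board : List (List Int)) (i j : Int) :
    List (Int × Int) → PySem.Dict Int Int → Bool
  | [], _ => true
  | (ii, jj) :: rest, d =>
    let lin := ii + i * 3
    let col := jj + j * 3
    let nr := pvGet board lin col
    if nr ≠ 0 ∧ d.contains nr = true then false
    else vzInner board i j rest (d.insert nr nr)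

-- the (ii, jj) (resp. (i, j)) pairs of the two nested 'for … in range(3)' loops
def vzPairsA : List (Int × Int) :=
  (PySem.List.pyRange 0 3 1).flatMap (fun a => (PySem.List.pyRange 0 3 1).map (fun b => (a, b)))

def vzOuter (board : List (List Int)) : List (Int × Int) → Bool
  | [] => true
  | (i, j) :: rest =>
    if vzInner board i j vzPairsA PySem.Dict.empty = false then false
    else vzOuter board rest

def verifica_zone (board : List (List Int)) : Bool :=
  vzOuter board vzPairsA

-- ===== PORT B =====
-- go(k, seen); Python's guard is 'k == 81' and go is only ever called with k ≤ 81,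
-- the '81 ≤ k' form of the same guard makes the Lean recursion terminate for every k
def vzGo (board : List (List Int)) (k : Nat) (seen : PySem.Set Int) : Bool :=
  if h : 81 ≤ k then true
  else
    let z := k / 9
    let c := k % 9
    let v := pvGet board (((z / 3) * 3 + c / 3 : Nat) : Int) (((z % 3) * 3 + c % 3 : Nat) : Int)
    if v ≠ 0 ∧ seen.contains v = true then false
    else vzGo board (k + 1) (if c = 8 then PySem.Set.empty else PySem.Set.union seen (PySem.Set.ofList [v]))
  termination_by 81 - k
  decreasing_by omega

def verifica_zone_alt (board : List (List Int)) : Bool :=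
  vzGo board 0 PySem.Set.empty

-- ===== PRECONDITION & SPEC =====
-- row/column of the k-th cell of the zone-major scan (zone k/9, cell k%9), and its value
def vzRow (k : Nat) : Nat := (k / 9 / 3) * 3 + (k % 9) / 3
def vzCol (k : Nat) : Nat := (k / 9 % 3) * 3 + (k % 9) % 3
def vzValid (board : List (List Int)) (k : Nat) : Bool :=
  decide (vzRow k < board.length) && decide (vzCol k < (board.getD (vzRow k) []).length)
def vzVal (board : List (List Int)) (k : Nat) : Int :=
  (board.getD (vzRow k) []).getD (vzCol k) 0

-- A raises IndexError at the first out-of-range cell of its zone-major scan; it returns iff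
-- either all 81 cells are in range, or some cell n with the whole scan prefix in range repeats
-- an earlier nonzero value of the same zone (A returns False at or before n, before any bad read)
def Pre_verifica_zone (board : List (List Int)) : Prop :=
  (∀ k, k < 81 → vzValid board k = true) ∨
  (∃ n, n < 81 ∧ (∀ m, m ≤ n → vzValid board m = true) ∧ vzVal board n ≠ 0 ∧
    ∃ m, m < n ∧ m / 9 = n / 9 ∧ vzVal board m = vzVal board n)
instance (board : List (List Int)) : Decidable (Pre_verifica_zone board) := by
  unfold Pre_verifica_zone; infer_instance

def pvWitness_verifica_zone : List (List Int) :=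
  [[1,2,3,4,5,6,7,8,9],[0,0,0,0,0,0,0,0,0],[0,0,0,0,0,0,0,0,0],
   [0,0,0,0,0,0,0,0,0],[0,0,0,0,0,0,0,0,0],[0,0,0,0,0,0,0,0,0],
   [0,0,0,0,0,0,0,0,0],[0,0,0,0,0,0,0,0,0],[0,0,0,0,0,0,0,0,0]]

def Spec_verifica_zone (board : List (List Int)) (out : Bool) : Prop := out = verifica_zone_alt board
instance (board : List (List Int)) (out : Bool) : Decidable (Spec_verifica_zone board out) := by unfold Spec_verifica_zone; infer_instance

-- ===== CLAIM (what is proved, stated in full; the proofs are below) =====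
def Claim_equal_verifica_zone : Prop := ∀ (board : List (List Int)), Dom_verifica_zone board → Pre_verifica_zone board → Spec_verifica_zone board (verifica_zone board)

-- ===== LEMMAS AND PROOFS =====

-- the values B reads in zone z, in scan order
def vzVals (board : List (List Int)) (z : Nat) : List Int :=
  (List.range 9).map (fun t =>
    pvGet board (((z / 3) * 3 + t / 3 : Nat) : Int) (((z % 3) * 3 + t % 3 : Nat) : Int))

-- characterization of A's inner dict loop
lemma vzInner_iff (board : List (List Int)) (i j : Int) (cells : List (Int × Int))
    (d : PySem.Dict Int Int) :
    vzInner board i j cells d = true ↔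
      (((cells.map (fun c => pvGet board (c.1 + i * 3) (c.2 + j * 3))).filter
          (fun v => v != 0)).Nodup
       ∧ ∀ v ∈ cells.map (fun c => pvGet board (c.1 + i * 3) (c.2 + j * 3)),
           v ≠ 0 → d.contains v = false) := by
  induction cells generalizing d with
  | nil => simp [vzInner]
  | cons c rest ih =>
    obtain ⟨ii, jj⟩ := c
    simp only [vzInner, List.map_cons, List.filter_cons, List.forall_mem_cons]
    by_cases h0 : pvGet board (ii + i * 3) (jj + j * 3) = 0
    · rw [if_neg (by simp [h0])]
      rw [ih]
      simp only [h0, PySem.Dict.contains_insert, show ((0:Int) != 0) = false from rfl,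
        Bool.false_eq_true, if_false]
      constructor
      · rintro ⟨hn, hco⟩
        refine ⟨hn, fun h => absurd rfl h, fun v hv hne => ?_⟩
        have := hco v hv hne
        simpa [hne] using this
      · rintro ⟨hn, -, hco⟩
        refine ⟨hn, fun v hv hne => ?_⟩
        simp [hco v hv hne, hne]
    · by_cases hc : d.contains (pvGet board (ii + i * 3) (jj + j * 3)) = true
      · rw [if_pos ⟨h0, hc⟩]
        constructor
        · intro h; exact absurd h (by simp)
        · rintro ⟨-, hhead, -⟩
          rw [hhead h0] at hc
          exact absurd hc (by simp)
      · have hcf : d.contains (pvGet board (ii + i * 3) (jj + j * 3)) = false := by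
          simpa using hc
        rw [if_neg (by tauto)]
        rw [ih]
        simp only [show (pvGet board (ii + i * 3) (jj + j * 3) != 0) = true by simpa using h0,
          if_true, List.nodup_cons, List.mem_filter, PySem.Dict.contains_insert]
        constructor
        · rintro ⟨hn, hco⟩
          refine ⟨⟨?_, hn⟩, fun _ => hcf, fun v hv hne => ?_⟩
          · rintro ⟨hv, -⟩
            have := hco _ hv h0
            simp at this
          · have := hco v hv hne
            simp at this
            exact this.2
        · rintro ⟨⟨hnm, hn⟩, -, hco⟩
          refine ⟨hn, fun v hv hne => ?_⟩
          have hvd := hco v hv hne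
          have hvne : v ≠ pvGet board (ii + i * 3) (jj + j * 3) := by
            intro he; exact hnm ⟨he ▸ hv, by simp⟩
          simp [hvne, hvd]

-- A's outer loop is all()
lemma vzOuter_eq_all (board : List (List Int)) (ps : List (Int × Int)) :
    vzOuter board ps = ps.all (fun p => vzInner board p.1 p.2 vzPairsA PySem.Dict.empty) := by
  induction ps with
  | nil => rfl
  | cons p rest ih =>
    obtain ⟨i, j⟩ := p
    simp only [vzOuter, List.all_cons, ih]
    cases h : vzInner board i j vzPairsA PySem.Dict.empty <;> simp

-- characterization of B's recursion inside zone z (n = cells left in the zone)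
lemma vzGo_zone (board : List (List Int)) (z : Nat) (hz : z < 9) :
    ∀ n t seen, t + n = 9 → 1 ≤ n →
    (vzGo board (9 * z + t) seen = true ↔
      ((((vzVals board z).drop t).filter (fun v => v != 0)).Nodup ∧
        (∀ v ∈ (vzVals board z).drop t, v ≠ 0 → v ∉ seen)) ∧
        vzGo board (9 * (z + 1)) PySem.Set.empty = true) := by
  intro n
  induction n with
  | zero => intro t seen _ h1; omega
  | succ n ih =>
    intro t seen ht _
    have ht8 : t ≤ 8 := by omega
    have hk : ¬ 81 ≤ 9 * z + t := by omega
    rw [vzGo, dif_neg hk]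
    have hdz : (9 * z + t) / 9 = z := by omega
    have hdc : (9 * z + t) % 9 = t := by omega
    simp only [hdz, hdc]
    have hlen : t < (vzVals board z).length := by simp [vzVals]; omega
    have hdrop : (vzVals board z).drop t = (vzVals board z)[t] :: (vzVals board z).drop (t + 1) :=
      List.drop_eq_getElem_cons hlen
    have hval : (vzVals board z)[t] =
        pvGet board (((z / 3) * 3 + t / 3 : Nat) : Int) (((z % 3) * 3 + t % 3 : Nat) : Int) := by
      simp [vzVals]
    set v := pvGet board (((z / 3) * 3 + t / 3 : Nat) : Int) (((z % 3) * 3 + t % 3 : Nat) : Int) with hv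
    rw [hdrop, hval]
    by_cases hbad : v ≠ 0 ∧ v ∈ seen
    · rw [if_pos ⟨hbad.1, (PySem.Set.contains_iff _ _).2 hbad.2⟩]
      constructor
      · intro h; exact absurd h (by simp)
      · rintro ⟨⟨-, hco⟩, -⟩
        exact absurd (hco v (by simp) hbad.1) (by simp [hbad.2])
    · have hcond : ¬ (v ≠ 0 ∧ PySem.Set.contains seen v = true) := by
        intro ⟨h1, h2⟩; exact hbad ⟨h1, (PySem.Set.contains_iff _ _).1 h2⟩
      rw [if_neg hcond]
      by_cases ht' : t = 8
      · subst ht'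
        have hn0 : n = 0 := by omega
        rw [if_pos rfl]
        have h9 : 9 * z + 8 + 1 = 9 * (z + 1) := by ring
        rw [h9]
        have hdrop9 : (vzVals board z).drop 9 = [] := by
          apply List.drop_eq_nil_of_le; simp [vzVals]
        rw [hdrop9]
        simp only [List.filter_nil, List.filter_cons, List.forall_mem_cons,
          List.not_mem_nil]
        constructor
        · intro h
          refine ⟨⟨by split <;> simp, fun h0 => ?_, by simp⟩, h⟩
          intro hmem; exact hbad ⟨h0, hmem⟩
        · rintro ⟨-, h⟩; exact h
      · rw [if_neg ht']
        rw [Nat.add_assoc]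
        rw [ih (t + 1) (PySem.Set.union seen (PySem.Set.ofList [v])) (by omega) (by omega)]
        simp only [List.filter_cons, List.forall_mem_cons, PySem.Set.mem_union,
          PySem.Set.mem_ofList, List.mem_singleton]
        by_cases h0 : v = 0
        · simp only [h0, show ((0:Int) != 0) = false from rfl, Bool.false_eq_true, if_false]
          constructor
          · rintro ⟨⟨hn, hco⟩, hnext⟩
            refine ⟨⟨hn, fun h => absurd rfl h, fun v' hv' hne => ?_⟩, hnext⟩
            have := hco v' hv' hne
            tauto
          · rintro ⟨⟨hn, -, hco⟩, hnext⟩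
            refine ⟨⟨hn, fun v' hv' hne => ?_⟩, hnext⟩
            intro hmem
            rcases hmem with hmem | hmem
            · exact hco v' hv' hne hmem
            · exact hne hmem
        · have hvs : v ∉ seen := fun hmem => hbad ⟨h0, hmem⟩
          simp only [show (v != 0) = true by simpa using h0, if_true, List.nodup_cons,
            List.mem_filter]
          constructor
          · rintro ⟨⟨hn, hco⟩, hnext⟩
            refine ⟨⟨⟨?_, hn⟩, fun _ => hvs, fun v' hv' hne => fun hmem => ?_⟩, hnext⟩
            · rintro ⟨hmem, -⟩
              exact hco v hmem h0 (Or.inr rfl)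
            · exact hco v' hv' hne (Or.inl hmem)
          · rintro ⟨⟨⟨hnm, hn⟩, -, hco⟩, hnext⟩
            refine ⟨⟨hn, fun v' hv' hne => fun hmem => ?_⟩, hnext⟩
            rcases hmem with hmem | hmem
            · exact hco v' hv' hne hmem
            · exact hnm ⟨hmem ▸ hv', by simp⟩

-- chaining the zones
lemma vzGo_zones (board : List (List Int)) :
    ∀ n z, z + n = 9 →
    (vzGo board (9 * z) PySem.Set.empty = true ↔
      ∀ z', z ≤ z' → z' < 9 → ((vzVals board z').filter (fun v => v != 0)).Nodup) := by
  intro n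
  induction n with
  | zero =>
    intro z hz
    have : z = 9 := by omega
    subst this
    rw [vzGo, dif_pos (by omega)]
    constructor
    · intro _ z' h1 h2; omega
    · intro _; rfl
  | succ n ih =>
    intro z hz
    have hz9 : z < 9 := by omega
    have h0 : (9 : Nat) * z = 9 * z + 0 := by omega
    rw [h0, vzGo_zone board z hz9 9 0 PySem.Set.empty (by omega) (by omega)]
    rw [ih (z + 1) (by omega)]
    simp only [List.drop_zero]
    constructor
    · rintro ⟨⟨hn, -⟩, hrest⟩ z' hle hlt
      rcases Nat.eq_or_lt_of_le hle with h | h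
      · rw [← h]; exact hn
      · exact hrest z' (by omega) hlt
    · intro h
      refine ⟨⟨h z (le_refl z) hz9, fun v _ _ => ?_⟩, fun z' hle hlt => h z' (by omega) hlt⟩
      simp [PySem.Set.empty]

-- the nine (i, j) zone pairs match the flat zone indices z = 3*i + j, with equal value lists
set_option maxHeartbeats 1000000 in
lemma pv_bridge (board : List (List Int)) :
    (∀ p ∈ vzPairsA,
      ((vzPairsA.map (fun c => pvGet board (c.1 + p.1 * 3) (c.2 + p.2 * 3))).filter
        (fun v => v != 0)).Nodup)
    ↔ (∀ z', 0 ≤ z' → z' < 9 → ((vzVals board z').filter (fun v => v != 0)).Nodup) := by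
  have hp : vzPairsA = [((0:Int),(0:Int)),(0,1),(0,2),(1,0),(1,1),(1,2),(2,0),(2,1),(2,2)] := by
    decide
  have hv : ∀ i j : Int, ∀ z : Nat, (i, j) ∈ vzPairsA → z = (3 * i.toNat + j.toNat) →
      vzPairsA.map (fun c => pvGet board (c.1 + i * 3) (c.2 + j * 3)) = vzVals board z := by
    rw [hp]
    intro i j z hmem hzv
    fin_cases hmem <;> (subst hzv; simp [vzVals, List.range_succ, pvGet])
  rw [hp]
  constructor
  · intro h z' _ hz'
    interval_cases z' <;>
      [ (rw [← hv 0 0 0 (by decide) (by decide)]; rw [hp]; exact h (0, 0) (by decide));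
        (rw [← hv 0 1 1 (by decide) (by decide)]; rw [hp]; exact h (0, 1) (by decide));
        (rw [← hv 0 2 2 (by decide) (by decide)]; rw [hp]; exact h (0, 2) (by decide));
        (rw [← hv 1 0 3 (by decide) (by decide)]; rw [hp]; exact h (1, 0) (by decide));
        (rw [← hv 1 1 4 (by decide) (by decide)]; rw [hp]; exact h (1, 1) (by decide));
        (rw [← hv 1 2 5 (by decide) (by decide)]; rw [hp]; exact h (1, 2) (by decide));
        (rw [← hv 2 0 6 (by decide) (by decide)]; rw [hp]; exact h (2, 0) (by decide));
        (rw [← hv 2 1 7 (by decide) (by decide)]; rw [hp]; exact h (2, 1) (by decide));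
        (rw [← hv 2 2 8 (by decide) (by decide)]; rw [hp]; exact h (2, 2) (by decide)) ]
  · intro h p hmem
    fin_cases hmem <;> simp only [← hp] <;>
      [ rw [hv 0 0 0 (by decide) (by decide)]; rw [hv 0 1 1 (by decide) (by decide)];
        rw [hv 0 2 2 (by decide) (by decide)]; rw [hv 1 0 3 (by decide) (by decide)];
        rw [hv 1 1 4 (by decide) (by decide)]; rw [hv 1 2 5 (by decide) (by decide)];
        rw [hv 2 0 6 (by decide) (by decide)]; rw [hv 2 1 7 (by decide) (by decide)];
        rw [hv 2 2 8 (by decide) (by decide)] ] <;>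
      exact h _ (by omega) (by omega)

-- ===== VERDICT (by name: the statement is the Claim_ definition above) =====
theorem verifica_zone_spec : Claim_equal_verifica_zone := by
  intro board _ _
  unfold Spec_verifica_zone verifica_zone verifica_zone_alt
  rw [Bool.eq_iff_iff]
  rw [vzOuter_eq_all, List.all_eq_true]
  have hA : (∀ p ∈ vzPairsA, vzInner board p.1 p.2 vzPairsA PySem.Dict.empty = true) ↔
      (∀ p ∈ vzPairsA,
        ((vzPairsA.map (fun c => pvGet board (c.1 + p.1 * 3) (c.2 + p.2 * 3))).filter
          (fun v => v != 0)).Nodup) := by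
    constructor
    · intro h p hmem
      exact ((vzInner_iff board p.1 p.2 vzPairsA PySem.Dict.empty).1 (h p hmem)).1
    · intro h p hmem
      exact (vzInner_iff board p.1 p.2 vzPairsA PySem.Dict.empty).2
        ⟨h p hmem, fun v _ _ => PySem.Dict.contains_empty v⟩
  rw [hA, pv_bridge]
  have h0 : (0 : Nat) = 9 * 0 := by omega
  rw [show vzGo board 0 PySem.Set.empty = vzGo board (9 * 0) PySem.Set.empty from by rw [← h0]]
  rw [vzGo_zones board 9 0 (by omega)]
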